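-- pv_equiv track=rewrite | github.com/YoungminLee-BEL/codon-optimizer-kphaffii | optimizer/optimizer.py | _find_repeats
-- ===== SOURCE A (Python) =====
-- def _find_repeats(seq: str, min_len: int = 21) -> list[tuple[int, int]]:
--     """Return (start, end) of second (and later) occurrences of repeated substrings."""
--     n = len(seq)
--     second_occurrences = []
--     seen: dict[str, int] = {}
--     for length in range(min_len, n // 2 + 1):
--         for i in range(n - length + 1):
--             s = seq[i:i + length]
--             if s in seen:
--                 # This is a second+ occurrence — record it for fixing
--                 if i not in [x for x, _ in second_occurrences]:
--                     second_occurrences.append((i, i + length))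
--             else:
--                 seen[s] = i
--     return second_occurrences
-- ===== SOURCE B (Python) =====
-- def _find_repeats(seq: str, min_len: int = 21) -> list[tuple[int, int]]:
--     """Return (start, end) of second (and later) occurrences of repeated substrings."""
--     n = len(seq)
--     if not (0 <= min_len <= n // 2):
--         return []
--     seen: set[str] = set()
--     out: list[tuple[int, int]] = []
--     for i in range(n - min_len + 1):
--         s = seq[i:i + min_len]
--         if s in seen:
--             out.append((i, i + min_len))
--         else:
--             seen.add(s)
--     return out
-- ===== Notes on version B (the rewrite author's own statement) =====
-- stated objective: simpler
-- what changed: B replaces A's triple loop over all lengths min_len..n//2 (dict of all windows plus a linear rescan of the result list for dedup) by a single scan at length min_len with a set: any longer repeat implies its length-min_len prefix repeats, and A's start-index dedup means only the first, shortest hit is ever recorded.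
-- intended difference: For min_len < 0 Python's negative-length and wrapped slices make A record nonsense spans such as (1, 0) and (0, 0); B returns [], the intended value since no substring of negative length can repeat. — e.g. on _find_repeats("", -1): A returns [(1, 0), (0, 0)], B returns []
import Mathlib
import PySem

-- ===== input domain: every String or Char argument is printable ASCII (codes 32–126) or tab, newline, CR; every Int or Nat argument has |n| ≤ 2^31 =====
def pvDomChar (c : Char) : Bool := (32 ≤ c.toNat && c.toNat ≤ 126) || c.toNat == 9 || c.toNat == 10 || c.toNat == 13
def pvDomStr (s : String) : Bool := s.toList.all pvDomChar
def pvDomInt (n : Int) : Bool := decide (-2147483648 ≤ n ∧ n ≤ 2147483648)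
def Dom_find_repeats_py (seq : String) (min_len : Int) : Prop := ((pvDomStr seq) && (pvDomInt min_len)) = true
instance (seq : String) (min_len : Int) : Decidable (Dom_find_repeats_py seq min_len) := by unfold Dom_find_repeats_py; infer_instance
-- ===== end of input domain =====

-- B replaces A's scan over every window length in [min_len, n//2] by a single scan at
-- length min_len (a longer repeat always implies a repeat of its length-min_len prefix, and
-- A's start-index dedup keeps only that first, shortest hit); objective: simpler.
-- For min_len < 0 B returns [] where A returns nonsense spans (see D_ below).

-- ===== PORT A =====
-- shared helper: the Python slice seq[i:i+L]
def pvSlice (cs : List Char) (i L : Int) : List Char :=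
  PySem.List.slice cs (some i) (some (i + L))

-- body of A's inner loop (one index i at a fixed window length)
def AStep (cs : List Char) (length : Int)
    (st : List (Int × Int) × PySem.Dict (List Char) Int) (i : Int) :
    List (Int × Int) × PySem.Dict (List Char) Int :=
  let s := pvSlice cs i length
  if st.2.contains s then
    if i ∈ st.1.map Prod.fst then st
    else (st.1 ++ [(i, i + length)], st.2)
  else (st.1, st.2.insert s i)

-- A's inner loop: for i in range(n - length + 1)
def APass (cs : List Char) (n length : Int)
    (st : List (Int × Int) × PySem.Dict (List Char) Int) :
    List (Int × Int) × PySem.Dict (List Char) Int :=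
  (PySem.List.pyRange 0 (n - length + 1) 1).foldl (AStep cs length) st

def find_repeats_py (seq : String) (min_len : Int) : List (Int × Int) :=
  ((PySem.List.pyRange min_len
      (PySem.Int.floordiv (seq.toList.length : Int) 2 + 1) 1).foldl
    (fun st length => APass seq.toList (seq.toList.length : Int) length st)
    ([], PySem.Dict.empty)).1

-- ===== PORT B =====
-- body of B's single loop
def BStep (cs : List Char) (min_len : Int)
    (st : List (Int × Int) × PySem.Set (List Char)) (i : Int) :
    List (Int × Int) × PySem.Set (List Char) :=
  let s := pvSlice cs i min_len
  if PySem.Set.contains st.2 s then (st.1 ++ [(i, i + min_len)], st.2)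
  else (st.1, PySem.Set.add st.2 s)

def find_repeats_py_alt (seq : String) (min_len : Int) : List (Int × Int) :=
  if ¬ (0 ≤ min_len ∧ min_len ≤ PySem.Int.floordiv (seq.toList.length : Int) 2) then []
  else
    ((PySem.List.pyRange 0 ((seq.toList.length : Int) - min_len + 1) 1).foldl
      (BStep seq.toList min_len) ([], PySem.Set.empty)).1

-- ===== PRECONDITION & SPEC =====
-- For min_len < 0 Python's negative-length and wrapped slices make A record nonsense spans
-- such as (1, 0) and (0, 0); B returns [], the intended value since no substring of
-- negative length can repeat.
def D_find_repeats_py (seq : String) (min_len : Int) : Prop := min_len < 0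
instance (seq : String) (min_len : Int) : Decidable (D_find_repeats_py seq min_len) := by
  unfold D_find_repeats_py; infer_instance

def Spec_find_repeats_py (seq : String) (min_len : Int) (out : List (Int × Int)) : Prop :=
  ¬ D_find_repeats_py seq min_len → out = find_repeats_py_alt seq min_len
instance (seq : String) (min_len : Int) (out : List (Int × Int)) : Decidable (Spec_find_repeats_py seq min_len out) := by unfold Spec_find_repeats_py; infer_instance

def pvDiffWitness_find_repeats_py : String × Int := ("", -1)
def pvDiffWitnessOut_find_repeats_py : (List (Int × Int)) × (List (Int × Int)) :=
  ([(1, 0), (0, 0)], [])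

-- ===== CLAIM (what is proved, stated in full; the proofs are below) =====
def Claim_unchanged_find_repeats_py : Prop := ∀ (seq : String) (min_len : Int), Dom_find_repeats_py seq min_len → Spec_find_repeats_py seq min_len (find_repeats_py seq min_len)
def Claim_changed_find_repeats_py : Prop := Dom_find_repeats_py (pvDiffWitness_find_repeats_py.1) (pvDiffWitness_find_repeats_py.2) ∧ D_find_repeats_py (pvDiffWitness_find_repeats_py.1) (pvDiffWitness_find_repeats_py.2) ∧ find_repeats_py (pvDiffWitness_find_repeats_py.1) (pvDiffWitness_find_repeats_py.2) = pvDiffWitnessOut_find_repeats_py.1 ∧ find_repeats_py_alt (pvDiffWitness_find_repeats_py.1) (pvDiffWitness_find_repeats_py.2) = pvDiffWitnessOut_find_repeats_py.2 ∧ pvDiffWitnessOut_find_repeats_py.1 ≠ pvDiffWitnessOut_find_repeats_py.2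

-- ===== LEMMAS AND PROOFS =====

-- length of the window slice
theorem pvSlice_length (cs : List Char) (i L : Int) (hi : 0 ≤ i) (hL : 0 ≤ L)
    (hiL : i + L ≤ (cs.length : Int)) : (pvSlice cs i L).length = L.toNat := by
  unfold pvSlice
  rw [PySem.List.slice_toNat cs hi (by omega)]
  simp [List.length_take, List.length_drop]
  omega

-- a window at i of length m is the m-prefix of the window at i of length L ≥ m
theorem pvSlice_take (cs : List Char) (i m L : Int) (hi : 0 ≤ i) (_hm : 0 ≤ m)
    (hmL : m ≤ L) : pvSlice cs i m = (pvSlice cs i L).take m.toNat := by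
  unfold pvSlice
  rw [PySem.List.slice_toNat cs hi (by omega), PySem.List.slice_toNat cs hi (by omega),
    List.take_take]
  congr 1
  omega

-- equal length-L windows have equal length-m prefixes
theorem pvSlice_prefix_eq (cs : List Char) (i i' m L : Int) (hi : 0 ≤ i) (hi' : 0 ≤ i')
    (hm : 0 ≤ m) (hmL : m ≤ L) (h : pvSlice cs i' L = pvSlice cs i L) :
    pvSlice cs i' m = pvSlice cs i m := by
  rw [pvSlice_take cs i m L hi hm hmL, pvSlice_take cs i' m L hi' hm hmL, h]

-- the first pass (length = min_len) of A runs in lockstep with B's single loop;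
-- afterwards the dict keys are exactly the length-m windows and the recorded starts are
-- exactly the repeated windows
theorem pass1_sync (cs : List Char) (m : Int) (hm : 0 ≤ m) :
    ∀ (k : Nat) (a : Int) (occ : List (Int × Int)) (dict : PySem.Dict (List Char) Int)
      (st : PySem.Set (List Char)),
      0 ≤ a → a ≤ (cs.length : Int) - m + 1 →
      ((cs.length : Int) - m + 1 - a).toNat = k →
      dict.keys = st →
      (∀ s : List Char, s ∈ st ↔ ∃ i', 0 ≤ i' ∧ i' < a ∧ pvSlice cs i' m = s) →
      (∀ i : Int, i ∈ occ.map Prod.fst ↔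
        (0 ≤ i ∧ i < a ∧ ∃ i', 0 ≤ i' ∧ i' < i ∧ pvSlice cs i' m = pvSlice cs i m)) →
      ((PySem.List.pyRange a ((cs.length : Int) - m + 1) 1).foldl (AStep cs m) (occ, dict)).1
        = ((PySem.List.pyRange a ((cs.length : Int) - m + 1) 1).foldl (BStep cs m) (occ, st)).1
      ∧ (∀ s : List Char,
          s ∈ ((PySem.List.pyRange a ((cs.length : Int) - m + 1) 1).foldl (AStep cs m) (occ, dict)).2.keys
          ↔ ∃ i', 0 ≤ i' ∧ i' < (cs.length : Int) - m + 1 ∧ pvSlice cs i' m = s)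
      ∧ (∀ i : Int,
          i ∈ (((PySem.List.pyRange a ((cs.length : Int) - m + 1) 1).foldl (AStep cs m) (occ, dict)).1.map Prod.fst) ↔
          (0 ≤ i ∧ i < (cs.length : Int) - m + 1 ∧
            ∃ i', 0 ≤ i' ∧ i' < i ∧ pvSlice cs i' m = pvSlice cs i m)) := by
  intro k
  induction k with
  | zero =>
    intro a occ dict st ha ha2 hk hkeys hH2 hH3
    have haeq : a = (cs.length : Int) - m + 1 := by omega
    rw [PySem.List.pyRange_one_eq_nil (by omega)]
    simp only [List.foldl_nil]
    subst haeq
    exact ⟨trivial, fun s => by rw [hkeys]; exact hH2 s, hH3⟩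
  | succ k ih =>
    intro a occ dict st ha ha2 hk hkeys hH2 hH3
    have hab : a < (cs.length : Int) - m + 1 := by omega
    rw [PySem.List.pyRange_one_cons hab]
    simp only [List.foldl_cons]
    by_cases hmem : pvSlice cs a m ∈ st
    · have hAc : dict.contains (pvSlice cs a m) = true := by
        rw [PySem.Dict.contains_eq_decide_mem_keys, hkeys]; simpa
      have hBc : PySem.Set.contains st (pvSlice cs a m) = true :=
        (PySem.Set.contains_iff st _).mpr hmem
      have hnotin : a ∉ occ.map Prod.fst := by
        intro hcon; rcases (hH3 a).mp hcon with ⟨_, h2, _⟩; omega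
      have hA : AStep cs m (occ, dict) a = (occ ++ [(a, a + m)], dict) := by
        simp [AStep, hAc, hnotin]
      have hB : BStep cs m (occ, st) a = (occ ++ [(a, a + m)], st) := by
        simp [BStep, hmem]
      rw [hA, hB]
      refine ih (a + 1) (occ ++ [(a, a + m)]) dict st (by omega) (by omega) (by omega)
        hkeys ?_ ?_
      · intro s
        constructor
        · intro hs; rcases (hH2 s).mp hs with ⟨i', h1, h2, h3⟩; exact ⟨i', h1, by omega, h3⟩
        · rintro ⟨i', h1, h2, h3⟩
          by_cases h4 : i' < a
          · exact (hH2 s).mpr ⟨i', h1, h4, h3⟩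
          · have : i' = a := by omega
            subst this; rwa [← h3]
      · intro i
        simp only [List.map_append, List.map_cons, List.map_nil, List.mem_append,
          List.mem_singleton]
        constructor
        · rintro (h | h)
          · rcases (hH3 i).mp h with ⟨h1, h2, h3⟩; exact ⟨h1, by omega, h3⟩
          · subst h
            rcases (hH2 _).mp hmem with ⟨i', h1, h2, h3⟩
            exact ⟨ha, by omega, ⟨i', h1, h2, h3⟩⟩
        · rintro ⟨h1, h2, h3⟩
          by_cases h4 : i < a
          · exact Or.inl ((hH3 i).mpr ⟨h1, h4, h3⟩)
          · have : i = a := by omega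
            subst this; exact Or.inr rfl
    · have hAc : dict.contains (pvSlice cs a m) = false := by
        rw [PySem.Dict.contains_eq_decide_mem_keys, hkeys]; simpa
      have hBc : PySem.Set.contains st (pvSlice cs a m) = false := by
        rw [← Bool.not_eq_true, PySem.Set.contains_iff]; exact hmem
      have hA : AStep cs m (occ, dict) a = (occ, dict.insert (pvSlice cs a m) a) := by
        simp [AStep, hAc]
      have hB : BStep cs m (occ, st) a = (occ, st ++ [pvSlice cs a m]) := by
        simp [BStep, hmem]
      rw [hA, hB]
      refine ih (a + 1) occ (dict.insert (pvSlice cs a m) a) (st ++ [pvSlice cs a m])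
        (by omega) (by omega) (by omega) ?_ ?_ ?_
      · rw [PySem.Dict.keys_insert_of_not_contains dict a hAc, hkeys]
      · intro s
        simp only [List.mem_append, List.mem_singleton]
        constructor
        · rintro (hs | hs)
          · rcases (hH2 s).mp hs with ⟨i', h1, h2, h3⟩; exact ⟨i', h1, by omega, h3⟩
          · exact ⟨a, ha, by omega, hs.symm⟩
        · rintro ⟨i', h1, h2, h3⟩
          by_cases h4 : i' < a
          · exact Or.inl ((hH2 s).mpr ⟨i', h1, h4, h3⟩)
          · have : i' = a := by omega
            subst this; exact Or.inr h3.symm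
      · intro i
        rw [hH3 i]
        constructor
        · rintro ⟨h1, h2, h3⟩; exact ⟨h1, by omega, h3⟩
        · rintro ⟨h1, h2, h3⟩
          by_cases h4 : i < a
          · exact ⟨h1, h4, h3⟩
          · have : i = a := by omega
            subst this
            rcases h3 with ⟨i', g1, g2, g3⟩
            exact absurd ((hH2 _).mpr ⟨i', g1, g2, g3⟩) hmem

-- keys a later pass (window length L > m) can meet: windows of some earlier length
def OldKey (cs : List Char) (m L : Int) (s : List Char) : Prop :=
  ∃ L' i', m ≤ L' ∧ L' < L ∧ 0 ≤ i' ∧ i' + L' ≤ (cs.length : Int) ∧ pvSlice cs i' L' = s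

-- a pass at length L > m never appends: every hit was already recorded in pass m
theorem passL_keeps (cs : List Char) (m L : Int) (hm : 0 ≤ m) (hL : m < L) :
    ∀ (k : Nat) (a : Int) (occ : List (Int × Int)) (dict : PySem.Dict (List Char) Int),
      0 ≤ a →
      ((cs.length : Int) - L + 1 - a).toNat = k →
      (∀ s ∈ dict.keys, OldKey cs m L s ∨
        ∃ i', 0 ≤ i' ∧ i' < a ∧ i' + L ≤ (cs.length : Int) ∧ pvSlice cs i' L = s) →
      (∀ i : Int, 0 ≤ i → i + m ≤ (cs.length : Int) →
        (∃ i', 0 ≤ i' ∧ i' < i ∧ pvSlice cs i' m = pvSlice cs i m) → i ∈ occ.map Prod.fst) →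
      ((PySem.List.pyRange a ((cs.length : Int) - L + 1) 1).foldl (AStep cs L) (occ, dict)).1 = occ
      ∧ (∀ s ∈ ((PySem.List.pyRange a ((cs.length : Int) - L + 1) 1).foldl (AStep cs L) (occ, dict)).2.keys,
          OldKey cs m (L + 1) s) := by
  intro k
  induction k with
  | zero =>
    intro a occ dict ha hk hK hJ2
    rw [PySem.List.pyRange_one_eq_nil (by omega)]
    simp only [List.foldl_nil]
    refine ⟨trivial, ?_⟩
    intro s hs
    rcases hK s hs with h | ⟨i', h1, h2, h3, h4⟩
    · rcases h with ⟨L', i', g1, g2, g3, g4, g5⟩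
      exact ⟨L', i', g1, by omega, g3, g4, g5⟩
    · exact ⟨L, i', by omega, by omega, h1, h3, h4⟩
  | succ k ih =>
    intro a occ dict ha hk hK hJ2
    have hab : a < (cs.length : Int) - L + 1 := by omega
    rw [PySem.List.pyRange_one_cons hab]
    simp only [List.foldl_cons]
    by_cases hc : pvSlice cs a L ∈ dict.keys
    · have hcc : dict.contains (pvSlice cs a L) = true := by
        rw [PySem.Dict.contains_eq_decide_mem_keys]; simpa
      rcases hK _ hc with hold | ⟨i', h1, h2, h3, h4⟩
      · -- impossible: an old key has a different length
        exfalso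
        rcases hold with ⟨L', i', g1, g2, g3, g4, g5⟩
        have e1 : (pvSlice cs i' L').length = L'.toNat :=
          pvSlice_length cs i' L' g3 (by omega) g4
        have e2 : (pvSlice cs a L).length = L.toNat :=
          pvSlice_length cs a L ha (by omega) (by omega)
        rw [g5, e2] at e1
        omega
      · -- repeat within this pass: its min_len prefix repeated, so a was recorded in pass m
        have hpre : pvSlice cs i' m = pvSlice cs a m :=
          pvSlice_prefix_eq cs a i' m L ha h1 hm (by omega) h4
        have hin : a ∈ occ.map Prod.fst :=
          hJ2 a ha (by omega) ⟨i', h1, h2, hpre⟩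
        have hA : AStep cs L (occ, dict) a = (occ, dict) := by
          simp [AStep, hcc, hin]
        rw [hA]
        refine ih (a + 1) occ dict (by omega) (by omega) ?_ hJ2
        intro s hs
        rcases hK s hs with h | ⟨j, g1, g2, g3, g4⟩
        · exact Or.inl h
        · exact Or.inr ⟨j, g1, by omega, g3, g4⟩
    · have hcc : dict.contains (pvSlice cs a L) = false := by
        rw [PySem.Dict.contains_eq_decide_mem_keys]; simpa
      have hA : AStep cs L (occ, dict) a = (occ, dict.insert (pvSlice cs a L) a) := by
        simp [AStep, hcc]
      rw [hA]
      refine ih (a + 1) occ _ (by omega) (by omega) ?_ hJ2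
      intro s hs
      rw [PySem.Dict.keys_insert_of_not_contains dict a hcc] at hs
      rcases List.mem_append.mp hs with hs | hs
      · rcases hK s hs with h | ⟨j, g1, g2, g3, g4⟩
        · exact Or.inl h
        · exact Or.inr ⟨j, g1, by omega, g3, g4⟩
      · rcases List.mem_singleton.mp hs with rfl
        exact Or.inr ⟨a, ha, by omega, by omega, rfl⟩

-- folding A over all remaining lengths leaves the recorded occurrences unchanged
theorem tail_passes (cs : List Char) (m : Int) (hm : 0 ≤ m) :
    ∀ (k : Nat) (L : Int) (occ : List (Int × Int)) (dict : PySem.Dict (List Char) Int),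
      m < L →
      ((PySem.Int.floordiv (cs.length : Int) 2 + 1) - L).toNat = k →
      (∀ s ∈ dict.keys, OldKey cs m L s) →
      (∀ i : Int, 0 ≤ i → i + m ≤ (cs.length : Int) →
        (∃ i', 0 ≤ i' ∧ i' < i ∧ pvSlice cs i' m = pvSlice cs i m) → i ∈ occ.map Prod.fst) →
      ((PySem.List.pyRange L (PySem.Int.floordiv (cs.length : Int) 2 + 1) 1).foldl
        (fun st length => APass cs (cs.length : Int) length st) (occ, dict)).1 = occ := by
  intro k
  induction k with
  | zero =>
    intro L occ dict hL hk hK hJ2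
    rw [PySem.List.pyRange_one_eq_nil (by omega)]
    simp only [List.foldl_nil]
  | succ k ih =>
    intro L occ dict hL hk hK hJ2
    have hLb : L < PySem.Int.floordiv (cs.length : Int) 2 + 1 := by omega
    rw [PySem.List.pyRange_one_cons hLb]
    simp only [List.foldl_cons]
    obtain ⟨heq, hkeys'⟩ :=
      passL_keeps cs m L hm hL ((cs.length : Int) - L + 1 - 0).toNat 0 occ dict le_rfl rfl
        (fun s hs => Or.inl (hK s hs)) hJ2
    have hst : APass cs (cs.length : Int) L (occ, dict)
        = (occ, (APass cs (cs.length : Int) L (occ, dict)).2) := by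
      apply Prod.ext <;> simp [APass] at heq ⊢ <;> exact heq
    rw [hst]
    exact ih (L + 1) occ _ (by omega) (by omega) (fun s hs => hkeys' s hs) hJ2

-- the two programs agree for every min_len ≥ 0
theorem find_repeats_eq_of_nonneg (seq : String) (min_len : Int) (hm : 0 ≤ min_len) :
    find_repeats_py seq min_len = find_repeats_py_alt seq min_len := by
  unfold find_repeats_py find_repeats_py_alt
  set cs := seq.toList with hcs
  set N : Int := (cs.length : Int) with hN
  have hNn : (0 : Int) ≤ N := by simp [hN]
  by_cases hcase : PySem.Int.floordiv N 2 < min_len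
  · rw [PySem.List.pyRange_one_eq_nil (by omega), if_pos (by omega)]
    rfl
  · push_neg at hcase
    rw [if_neg (by omega)]
    have hmn : min_len * 2 ≤ N := (PySem.Int.le_floordiv_iff_mul_le (by norm_num)).mp hcase
    rw [PySem.List.pyRange_one_cons (show min_len < PySem.Int.floordiv N 2 + 1 by omega)]
    simp only [List.foldl_cons]
    obtain ⟨hAB, hH2f, hH3f⟩ :=
      pass1_sync cs min_len hm (N - min_len + 1 - 0).toNat 0 [] PySem.Dict.empty
        PySem.Set.empty le_rfl (by omega) rfl
        (by rw [PySem.Dict.keys_empty]; rfl)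
        (by
          intro s
          constructor
          · intro h; simp [PySem.Set.empty] at h
          · rintro ⟨i', h1, h2, _⟩; omega)
        (by
          intro i
          constructor
          · intro h; simp at h
          · rintro ⟨h1, h2, _⟩; omega)
    have hJ2 : ∀ i : Int, 0 ≤ i → i + min_len ≤ N →
        (∃ i', 0 ≤ i' ∧ i' < i ∧ pvSlice cs i' min_len = pvSlice cs i min_len) →
        i ∈ (APass cs N min_len ([], PySem.Dict.empty)).1.map Prod.fst := by
      intro i h1 h2 h3
      exact (hH3f i).mpr ⟨h1, by omega, h3⟩
    have hK : ∀ s ∈ (APass cs N min_len ([], PySem.Dict.empty)).2.keys,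
        OldKey cs min_len (min_len + 1) s := by
      intro s hs
      rcases (hH2f s).mp hs with ⟨i', h1, h2, h3⟩
      exact ⟨min_len, i', le_rfl, by omega, h1, by omega, h3⟩
    have htail :=
      tail_passes cs min_len hm ((PySem.Int.floordiv N 2 + 1) - (min_len + 1)).toNat
        (min_len + 1) (APass cs N min_len ([], PySem.Dict.empty)).1
        (APass cs N min_len ([], PySem.Dict.empty)).2 (by omega) rfl hK hJ2
    exact htail.trans hAB

-- ===== VERDICT (by name: the statement is the Claim_ definition above) =====
theorem find_repeats_py_spec : Claim_unchanged_find_repeats_py := by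
  unfold Claim_unchanged_find_repeats_py
  intro seq min_len _ hD
  exact find_repeats_eq_of_nonneg seq min_len
    (by unfold D_find_repeats_py at hD; omega)

theorem find_repeats_py_changed : Claim_changed_find_repeats_py := by
  unfold Claim_changed_find_repeats_py; decide
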